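-- pv_equiv track=rewrite | github.com/KeskilTV/taichi-pose-detector | src/segment_detector.py | _merge_similar_segments
-- ===== SOURCE A (Python) =====
-- def _merge_similar_segments(segments):
--     """Сливает соседние сегменты с одинаковыми названиями"""
--     if len(segments) <= 1:
--         return segments
--
--     merged = [segments[0]]
--
--     for seg in segments[1:]:
--         if seg['name'] == merged[-1]['name']:
--             # Сливаем
--             merged[-1]['end'] = seg['end']
--         else:
--             merged.append(seg)
--
--     return merged
-- ===== SOURCE B (Python) =====
-- def _merge_similar_segments(segments):
--     """Merges adjacent segments with equal names (two-pointer run-jumping; mutates the first dict of each run in place like A)."""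
--     if len(segments) <= 1:
--         return segments
--
--     merged = []
--     i, n = 0, len(segments)
--     while i < n:
--         name = segments[i]['name']
--         j = i + 1
--         while j < n and segments[j]['name'] == name:
--             j += 1
--         first = segments[i]
--         if j - i > 1:
--             first['end'] = segments[j - 1]['end']
--         merged.append(first)
--         i = j
--     return merged
-- ===== Notes on version B (the rewrite author's own statement) =====
-- stated objective: alternative
-- what changed: Replaces A's element-wise loop that appends to `merged` and keeps extending merged[-1]['end'] by a two-pointer scan that jumps from one maximal equal-name run to the next and writes the run's final 'end' into its first dict exactly once.
import Mathlib
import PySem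

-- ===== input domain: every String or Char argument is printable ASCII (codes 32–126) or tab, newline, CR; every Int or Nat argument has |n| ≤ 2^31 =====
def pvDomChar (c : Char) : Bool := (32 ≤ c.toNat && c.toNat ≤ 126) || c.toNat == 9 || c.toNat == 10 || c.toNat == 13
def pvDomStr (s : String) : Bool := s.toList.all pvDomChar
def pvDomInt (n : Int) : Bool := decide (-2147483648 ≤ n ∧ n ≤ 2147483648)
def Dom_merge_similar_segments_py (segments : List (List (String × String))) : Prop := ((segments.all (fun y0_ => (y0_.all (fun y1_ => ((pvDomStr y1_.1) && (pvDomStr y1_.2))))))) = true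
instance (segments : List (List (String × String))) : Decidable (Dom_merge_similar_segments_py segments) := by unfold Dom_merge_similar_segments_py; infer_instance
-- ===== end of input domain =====

-- B replaces A's element-wise accumulate-and-extend loop by a two-pointer scan that jumps
-- from run to run of equal-name segments and writes each run's final 'end' once (objective:
-- alternative). Both A and B mutate the first dict of each merged run in place; the mutation
-- is identical, and the theorems below are about the return value.

-- ===== PORT A =====
-- seg['name'] / seg['end'] lookups and the 'end' assignment, via PySem.Dict over the pair list
def pvNameOf (seg : List (String × String)) : String := (PySem.Dict.mk seg).getD "name" ""
def pvEndOf (seg : List (String × String)) : String := (PySem.Dict.mk seg).getD "end" ""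
def pvSetEnd (seg : List (String × String)) (v : String) : List (String × String) :=
  ((PySem.Dict.mk seg).insert "end" v).items

-- the for-loop of A: acc = merged without its last element, last = merged[-1]
def pvMergeLoopA (acc : List (List (String × String))) (last : List (String × String)) :
    List (List (String × String)) → List (List (String × String))
  | [] => acc ++ [last]
  | seg :: rest =>
    if pvNameOf seg = pvNameOf last then
      pvMergeLoopA acc (pvSetEnd last (pvEndOf seg)) rest
    else
      pvMergeLoopA (acc ++ [last]) seg rest

def merge_similar_segments_py (segments : List (List (String × String))) :
    List (List (String × String)) :=
  if segments.length ≤ 1 then segments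
  else
    match segments with
    | [] => segments
    | s0 :: rest => pvMergeLoopA [] s0 rest

-- ===== PORT B =====
-- inner while loop of B: splits off the leading run of segments whose name is n
def pvTakeRun (n : String) : List (List (String × String)) →
    List (List (String × String)) × List (List (String × String))
  | [] => ([], [])
  | x :: xs =>
    if pvNameOf x = n then ((x :: (pvTakeRun n xs).1), (pvTakeRun n xs).2)
    else ([], x :: xs)

-- termination helper for pvRuns (cited in decreasing_by)
lemma pvTakeRun_snd_length_le (n : String) (xs : List (List (String × String))) :
    (pvTakeRun n xs).2.length ≤ xs.length := by
  induction xs with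
  | nil => simp [pvTakeRun]
  | cons x xs ih =>
    simp only [pvTakeRun]
    split
    · exact Nat.le_succ_of_le ih
    · simp

-- outer while loop of B: the list of maximal equal-name runs, in order
def pvRuns : List (List (String × String)) → List (List (List (String × String)))
  | [] => []
  | x :: xs =>
    (x :: (pvTakeRun (pvNameOf x) xs).1) :: pvRuns (pvTakeRun (pvNameOf x) xs).2
termination_by l => l.length
decreasing_by
  exact Nat.lt_succ_of_le (pvTakeRun_snd_length_le _ _)

-- body of B's outer loop: keep the run's first dict, writing the run's last 'end' into it if the run merges
def pvCollapse : List (List (String × String)) → List (String × String)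
  | [] => []
  | [x] => x
  | x :: y :: ys => pvSetEnd x (pvEndOf ((y :: ys).getLast (List.cons_ne_nil y ys)))

def merge_similar_segments_py_alt (segments : List (List (String × String))) :
    List (List (String × String)) :=
  if segments.length ≤ 1 then segments
  else (pvRuns segments).map pvCollapse

-- ===== PRECONDITION & SPEC =====
-- Pre_ is exactly where Python A returns: with ≥ 2 segments, every segment must have a
-- 'name' key (A reads seg['name'] for all of them) and every segment whose name equals its
-- predecessor's name must have an 'end' key (A reads seg['end'] exactly when merging);
-- outside this A raises KeyError.
def Pre_merge_similar_segments_py (segments : List (List (String × String))) : Prop :=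
  segments.length ≤ 1 ∨
  ((∀ s ∈ segments, (PySem.Dict.mk s).contains "name" = true) ∧
   (∀ p ∈ segments.zip segments.tail,
      pvNameOf p.1 = pvNameOf p.2 → (PySem.Dict.mk p.2).contains "end" = true))
instance (segments : List (List (String × String))) : Decidable (Pre_merge_similar_segments_py segments) := by unfold Pre_merge_similar_segments_py; infer_instance

def pvWitness_merge_similar_segments_py : (List (List (String × String))) :=
  [[("name", "stand"), ("end", "3")], [("name", "stand"), ("end", "7")], [("name", "kick"), ("end", "9")]]

def Spec_merge_similar_segments_py (segments : List (List (String × String))) (out : List (List (String × String))) : Prop := out = merge_similar_segments_py_alt segments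
instance (segments : List (List (String × String))) (out : List (List (String × String))) : Decidable (Spec_merge_similar_segments_py segments out) := by unfold Spec_merge_similar_segments_py; infer_instance

-- ===== CLAIM (what is proved, stated in full; the proofs are below) =====
def Claim_equal_merge_similar_segments_py : Prop := ∀ (segments : List (List (String × String))), Dom_merge_similar_segments_py segments → Pre_merge_similar_segments_py segments → Spec_merge_similar_segments_py segments (merge_similar_segments_py segments)

-- ===== LEMMAS AND PROOFS =====

lemma pvNameOf_setEnd (s : List (String × String)) (v : String) :
    pvNameOf (pvSetEnd s v) = pvNameOf s := by
  show ((PySem.Dict.mk s).insert "end" v).getD "name" "" = (PySem.Dict.mk s).getD "name" ""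
  rw [PySem.Dict.getD_insert_of_ne]
  decide

lemma pvSetEnd_setEnd (s : List (String × String)) (a b : String) :
    pvSetEnd (pvSetEnd s a) b = pvSetEnd s b :=
  congrArg PySem.Dict.items (PySem.Dict.insert_insert_self _ _ _ _)

lemma pvCollapse_merge (last seg : List (String × String)) (r : List (List (String × String))) :
    pvCollapse (pvSetEnd last (pvEndOf seg) :: r) = pvCollapse (last :: seg :: r) := by
  cases r with
  | nil => simp [pvCollapse]
  | cons z zs =>
    simp [pvCollapse, pvSetEnd_setEnd, List.getLast_cons (List.cons_ne_nil z zs)]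

lemma pvMergeLoopA_eq_runs (rest : List (List (String × String))) :
    ∀ (acc : List (List (String × String))) (last : List (String × String)),
      pvMergeLoopA acc last rest = acc ++ (pvRuns (last :: rest)).map pvCollapse := by
  induction rest with
  | nil =>
    intro acc last
    simp [pvMergeLoopA, pvRuns, pvTakeRun, pvCollapse]
  | cons seg rest ih =>
    intro acc last
    by_cases h : pvNameOf seg = pvNameOf last
    · rw [pvMergeLoopA, if_pos h, ih]
      rw [pvRuns, pvRuns]
      simp only [pvNameOf_setEnd, pvTakeRun, if_pos h, List.map_cons]
      rw [pvCollapse_merge]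
    · rw [pvMergeLoopA, if_neg h, ih]
      have ht : pvTakeRun (pvNameOf last) (seg :: rest) = ([], seg :: rest) := by
        simp [pvTakeRun, h]
      conv_rhs => rw [pvRuns, ht]
      simp [pvCollapse]

-- ===== VERDICT (by name: the statement is the Claim_ definition above) =====
theorem merge_similar_segments_py_spec : Claim_equal_merge_similar_segments_py := by
  intro segments _ _
  unfold Spec_merge_similar_segments_py
  unfold merge_similar_segments_py merge_similar_segments_py_alt
  match segments with
  | [] => rfl
  | [s0] => rfl
  | s0 :: s1 :: rest =>
    have h : ¬ (s0 :: s1 :: rest).length ≤ 1 := by simp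
    rw [if_neg h, if_neg h]
    show pvMergeLoopA [] s0 (s1 :: rest) = _
    rw [pvMergeLoopA_eq_runs]
    simp
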